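-- pv_equiv track=rewrite | github.com/turn281/nastran-utils | nastran-utils/nastran-utils.py | create_spc
-- ===== SOURCE A (Python) =====
-- def p(string='', limit=8):
--     """format string
--
--     Args:
--         string (str, optional): arbitrary string, the dafault, ''.
--
--     Returns:
--         str: the length is equal to limit
--     """
--     if len(str(string)) < limit:
--         return str(string) + ' '*(limit-len(str(string)))
--     else:
--         return str(string)[:limit-1] + ' '
--
-- def create_spc(spc_nodes, dof):
--     """create spc data
--
--     Args:
--         spc_nodes (array[float]): node identification numbers of spc nodes
--         dof (str): constraint degree of freedom (e.g. '123456')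
--
--     Returns:
--         list[str]: spc data of nastran input file format
--     """
--     spc_data = []
--     count = 0
--     init_ = True
--     while True:
--         if count == len(spc_nodes):
--             break
--         if init_:
--             init_ = False
--             row = p('SPC1') + p(1000) + p(dof)
--             for j in range(6):
--                 if count == len(spc_nodes):
--                     break
--                 row += p(int(spc_nodes[count]))
--                 count += 1
--         else:
--             row = p('')
--             for j in range(8):
--                 if count == len(spc_nodes):
--                     break
--                 row += p(int(spc_nodes[count]))
--                 count += 1
--         row += '\n'
--         spc_data.append(row)
--     return spc_data
-- ===== SOURCE B (Python) =====
-- def p(string='', limit=8):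
--     if len(str(string)) < limit:
--         return str(string) + ' '*(limit-len(str(string)))
--     else:
--         return str(string)[:limit-1] + ' '
--
-- def create_spc(spc_nodes, dof):
--     if not spc_nodes:
--         return []
--     rows = [p('SPC1') + p(1000) + p(dof)
--             + ''.join(p(int(n)) for n in spc_nodes[:6]) + '\n']
--     for i in range(6, len(spc_nodes), 8):
--         rows.append(p('') + ''.join(p(int(n)) for n in spc_nodes[i:i+8]) + '\n')
--     return rows
-- ===== Notes on version B (the rewrite author's own statement) =====
-- stated objective: simpler
-- what changed: Replaces A's stateful while-True loop with count/init_ flags and break-laden inner for-loops by a direct decomposition: an early [] return, a header row over spc_nodes[:6], and a plain slice loop over 8-node chunks joined per row.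
import Mathlib
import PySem

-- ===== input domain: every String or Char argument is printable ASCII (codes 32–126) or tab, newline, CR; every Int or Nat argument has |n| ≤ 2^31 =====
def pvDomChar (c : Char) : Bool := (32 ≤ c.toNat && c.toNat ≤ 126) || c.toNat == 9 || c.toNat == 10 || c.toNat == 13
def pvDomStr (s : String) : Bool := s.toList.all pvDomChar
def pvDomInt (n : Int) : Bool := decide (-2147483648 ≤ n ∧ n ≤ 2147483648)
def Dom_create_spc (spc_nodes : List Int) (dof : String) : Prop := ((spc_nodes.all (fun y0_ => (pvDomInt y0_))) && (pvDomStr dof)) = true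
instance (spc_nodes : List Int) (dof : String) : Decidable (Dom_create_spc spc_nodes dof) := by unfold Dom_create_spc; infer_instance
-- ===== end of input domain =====

-- B restructures A's stateful while/count/init_ loop into a head row over spc_nodes[:6]
-- plus a plain slice loop over 8-node chunks (objective: simpler decomposition, same cost).
-- Strings are modeled as List Char (exact: all text here is ASCII or Dom-admitted chars).

-- ===== PORT A =====
-- shared module helper p(string, limit=8), on char lists
def pfmt (cs : List Char) : List Char :=
  if cs.length < 8 then cs ++ List.replicate (8 - cs.length) ' '
  else cs.take 7 ++ [' ']

-- p(int(n)) for a node n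
def fmtNode (n : Int) : List Char := pfmt (PySem.Int.toChars n)

-- p('SPC1') + p(1000) + p(dof)
def headerChars (dof : String) : List Char :=
  pfmt "SPC1".toList ++ pfmt "1000".toList ++ pfmt dof.toList

-- the inner 'for j in range(k): if count == len: break; row += p(int(spc_nodes[count])); count += 1'
def spcTake : List Int → Nat → List Char → List Char × List Int
  | ns, 0, acc => (acc, ns)
  | [], _ + 1, acc => (acc, [])
  | n :: ns, k + 1, acc => spcTake ns k (acc ++ fmtNode n)

theorem spcTake_snd_len (ns : List Int) (k : Nat) (acc : List Char) :
    (spcTake ns k acc).2.length ≤ ns.length := by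
  induction ns generalizing k acc with
  | nil => cases k <;> simp [spcTake]
  | cons n ns ih =>
    cases k with
    | zero => simp [spcTake]
    | succ k => exact le_trans (ih k _) (by simp)

-- the while-loop after the first (init_) iteration: rows of up to 8 nodes
def spcLoop : List Int → List String
  | [] => []
  | n :: ns =>
    let r := spcTake ns 7 (pfmt [] ++ fmtNode n)
    String.ofList (r.1 ++ ['\n']) :: spcLoop r.2
termination_by ns => ns.length
decreasing_by
  simpa using Nat.lt_succ_of_le (spcTake_snd_len ns 7 _)

def create_spc (spc_nodes : List Int) (dof : String) : List String :=
  match spc_nodes with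
  | [] => []
  | n :: ns =>
    let r := spcTake ns 5 (headerChars dof ++ fmtNode n)
    String.ofList (r.1 ++ ['\n']) :: spcLoop r.2

-- ===== PORT B =====
-- spc_nodes[i:i+8] for i in range(6, len, 8): successive 8-chunks of the tail
def chunks8 : List Int → List (List Int)
  | [] => []
  | n :: ns => (n :: ns.take 7) :: chunks8 (ns.drop 7)
termination_by ns => ns.length
decreasing_by simpa using Nat.lt_succ_of_le (List.length_drop ▸ Nat.sub_le ns.length 7)

-- p('') + ''.join(p(int(n)) for n in chunk) + '\n'
def rowOf (cells : List Int) : String :=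
  String.ofList (pfmt [] ++ (cells.map fmtNode).flatten ++ ['\n'])

def create_spc_alt (spc_nodes : List Int) (dof : String) : List String :=
  match spc_nodes with
  | [] => []
  | n :: ns =>
    String.ofList (headerChars dof ++ ((n :: ns.take 5).map fmtNode).flatten ++ ['\n'])
      :: (chunks8 (ns.drop 5)).map rowOf

-- ===== PRECONDITION & SPEC =====
def Spec_create_spc (spc_nodes : List Int) (dof : String) (out : List String) : Prop := out = create_spc_alt spc_nodes dof
instance (spc_nodes : List Int) (dof : String) (out : List String) : Decidable (Spec_create_spc spc_nodes dof out) := by unfold Spec_create_spc; infer_instance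

-- ===== CLAIM (what is proved, stated in full; the proofs are below) =====
def Claim_equal_create_spc : Prop := ∀ (spc_nodes : List Int) (dof : String), Dom_create_spc spc_nodes dof → Spec_create_spc spc_nodes dof (create_spc spc_nodes dof)

-- ===== LEMMAS AND PROOFS =====
theorem spcTake_spec (ns : List Int) (k : Nat) (acc : List Char) :
    spcTake ns k acc = (acc ++ ((ns.take k).map fmtNode).flatten, ns.drop k) := by
  induction ns generalizing k acc with
  | nil => cases k <;> simp [spcTake]
  | cons n ns ih =>
    cases k with
    | zero => simp [spcTake]
    | succ k => simp [spcTake, ih]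

theorem spcLoop_eq : ∀ ns : List Int, spcLoop ns = (chunks8 ns).map rowOf
  | [] => by simp [spcLoop, chunks8]
  | n :: ns => by
    rw [spcLoop, chunks8, spcTake_spec]
    simp only [List.map_cons, rowOf, List.flatten_cons, List.append_assoc]
    exact congrArg _ (spcLoop_eq (ns.drop 7))
termination_by ns => ns.length
decreasing_by simpa using Nat.lt_succ_of_le (List.length_drop ▸ Nat.sub_le ns.length 7)

-- ===== VERDICT (by name: the statement is the Claim_ definition above) =====
theorem create_spc_spec : Claim_equal_create_spc := by
  intro spc_nodes dof _
  unfold Spec_create_spc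
  cases spc_nodes with
  | nil => rfl
  | cons n ns =>
    rw [create_spc, create_spc_alt, spcTake_spec, spcLoop_eq]
    simp [List.append_assoc]
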